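-- pv_equiv track=rewrite | github.com/syssi/esphome-jk-bms | scripts/extract-data-from-btsnoop.py | append_values
-- ===== SOURCE A (Python) =====
-- def append_values(values): #beginng of a packet is "55:aa:eb:90", append every packet after that till we hit "55:aa:eb:90" again
--   appended_values = []
--   current_packet = None
--
--   for value in values:
--       if value.startswith("55:aa:eb:90"):
--           if current_packet: #add the previus combined value
--               appended_values.append(''.join(current_packet))
--           current_packet = [value]
--       else:
--           current_packet.append(':' + value)
--
--   if current_packet and len(current_packet) == 4:
--       appended_values.append(''.join(current_packet))
--
--   return appended_values
-- ===== SOURCE B (Python) =====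
-- def append_values(values):
--     # Pass 1: group raw values into packets; a header starts a new group.
--     groups = []
--     current = None
--     for value in values:
--         if value.startswith("55:aa:eb:90"):
--             current = [value]
--             groups.append(current)
--         else:
--             current.append(value)
--     # Pass 2: join every full group; the last one only if it has exactly 4 parts.
--     out = [':'.join(g) for g in groups[:-1]]
--     if groups and len(groups[-1]) == 4:
--         out.append(':'.join(groups[-1]))
--     return out
-- ===== Notes on version B (the rewrite author's own statement) =====
-- stated objective: alternative
-- what changed: B first groups the raw values into packets (list of lists) in one pass, then joins each group with ':' in a second pass, instead of A's single pass that accumulates colon-prefixed strings and joins with ''.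
import Mathlib
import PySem

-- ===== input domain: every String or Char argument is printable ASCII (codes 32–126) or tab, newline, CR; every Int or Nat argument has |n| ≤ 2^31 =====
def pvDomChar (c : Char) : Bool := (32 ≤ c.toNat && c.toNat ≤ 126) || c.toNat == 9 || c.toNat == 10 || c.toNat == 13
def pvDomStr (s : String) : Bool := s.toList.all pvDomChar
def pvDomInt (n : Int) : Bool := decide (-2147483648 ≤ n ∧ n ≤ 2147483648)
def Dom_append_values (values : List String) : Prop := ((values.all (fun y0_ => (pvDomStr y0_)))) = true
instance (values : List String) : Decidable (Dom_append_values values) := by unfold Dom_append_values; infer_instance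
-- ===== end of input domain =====

-- B groups raw values into packets first and joins each group with ':' in a second pass,
-- instead of A's single pass over colon-prefixed strings joined with ''. (objective: alternative)


-- ===== PORT A =====
-- literal port of A's loop: one fold carrying (appended_values, current_packet : Option).
-- ':' + value is ported exactly as String.ofList (':' :: value.toList).
def avLoopA (values : List String) : List String × Option (List String) :=
  values.foldl (fun (st : List String × Option (List String)) value =>
      if PySem.Str.startswith value "55:aa:eb:90" then
        match st.2 with
        | some (c :: cs) => (st.1 ++ [PySem.Str.join "" (c :: cs)], some [value])
        | _ => (st.1, some [value])
      else
        match st.2 with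
        | some cp => (st.1, some (cp ++ [String.ofList (':' :: value.toList)]))
        | none => (st.1, none)  -- Python raises AttributeError here; excluded by Pre_
    ) ([], none)

def append_values (values : List String) : List String :=
  let st := avLoopA values
  match st.2 with
  | some (c :: cs) => if (c :: cs).length = 4 then st.1 ++ [PySem.Str.join "" (c :: cs)] else st.1
  | _ => st.1

-- ===== PORT B =====
-- pass 1 of Source B: the group list, kept in reverse order (the shared mutable last group is the head here)
def avGroupsRev (values : List String) : List (List String) :=
  values.foldl (fun rgroups value =>
      if PySem.Str.startswith value "55:aa:eb:90" then
        [value] :: rgroups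
      else
        match rgroups with
        | g :: gs => (g ++ [value]) :: gs
        | [] => []  -- Python raises AttributeError here; excluded by Pre_
    ) []

def append_values_alt (values : List String) : List String :=
  let groups := (avGroupsRev values).reverse
  -- pass 2 of Source B: join every group but the last; the last one only if it has 4 parts
  let out := groups.dropLast.map (fun g => PySem.Str.join ":" g)
  match groups.getLast? with
  | some g => if g.length = 4 then out ++ [PySem.Str.join ":" g] else out
  | none => out

-- ===== PRECONDITION & SPEC =====
-- Pre_ excludes exactly the inputs whose first value is not a header packet marker: there the
-- Python A (and the Python B alike) raises AttributeError, the current packet being still None.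
def Pre_append_values (values : List String) : Prop :=
  (values.head?.all (fun v => PySem.Str.startswith v "55:aa:eb:90")) = true
instance (values : List String) : Decidable (Pre_append_values values) := by unfold Pre_append_values; infer_instance

def pvWitness_append_values : List String := ["55:aa:eb:90", "01", "02", "03"]

def Spec_append_values (values : List String) (out : List String) : Prop := out = append_values_alt values
instance (values : List String) (out : List String) : Decidable (Spec_append_values values out) := by unfold Spec_append_values; infer_instance

-- ===== CLAIM (what is proved, stated in full; the proofs are below) =====
def Claim_equal_append_values : Prop := ∀ (values : List String), Dom_append_values values → Pre_append_values values → Spec_append_values values (append_values values)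

-- ===== LEMMAS AND PROOFS =====

-- A's current packet, expressed from B's current group: head kept, later parts colon-prefixed
def avColonize (g : List String) : List String :=
  match g with
  | [] => []
  | x :: xs => x :: xs.map (fun p => String.ofList (':' :: p.toList))

theorem avStr_toList_inj (s t : String) (h : s.toList = t.toList) : s = t := by
  have := congrArg String.ofList h
  simpa [String.ofList_toList] using this

theorem avJoin_shift (y : List Char) (ys : List (List Char)) :
    PySem.Chars.join [':'] ((':' :: y) :: ys) = ':' :: PySem.Chars.join [':'] (y :: ys) := by
  cases ys with
  | nil => simp [PySem.Chars.join_singleton]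
  | cons z zs => simp [PySem.Chars.join_cons_cons]

theorem avJoin_chars (xs : List (List Char)) : ∀ x : List Char,
    PySem.Chars.join [] (x :: xs.map (fun p => ':' :: p)) = PySem.Chars.join [':'] (x :: xs) := by
  induction xs with
  | nil => intro x; simp [PySem.Chars.join_singleton]
  | cons y ys ih =>
      intro x
      rw [List.map_cons, PySem.Chars.join_cons_cons, ih (':' :: y),
        avJoin_shift, PySem.Chars.join_cons_cons]
      simp

theorem avJoin_colonize (x : String) (xs : List String) :
    PySem.Str.join "" (x :: xs.map (fun p => String.ofList (':' :: p.toList)))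
      = PySem.Str.join ":" (x :: xs) := by
  apply avStr_toList_inj
  have h := avJoin_chars (xs.map String.toList) x.toList
  simpa [PySem.Str.toList_join, List.map_map, Function.comp_def, String.toList_ofList] using h

-- the fold invariant tying A's loop state to B's reversed group list
def avInv (st : List String × Option (List String)) (rgroups : List (List String)) : Prop :=
  (rgroups = [] ∧ st = ([], none)) ∨
  (∃ g gs, rgroups = g :: gs ∧ g ≠ [] ∧ st.2 = some (avColonize g) ∧
    st.1 = gs.reverse.map (fun g => PySem.Str.join ":" g))

theorem avColonize_append (g : List String) (v : String) (h : g ≠ []) :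
    avColonize g ++ [String.ofList (':' :: v.toList)] = avColonize (g ++ [v]) := by
  cases g with
  | nil => exact absurd rfl h
  | cons x xs => simp [avColonize]

theorem avInv_fold (values : List String) :
    ∀ st rgroups, avInv st rgroups →
      avInv (values.foldl (fun (st : List String × Option (List String)) value =>
          if PySem.Str.startswith value "55:aa:eb:90" then
            match st.2 with
            | some (c :: cs) => (st.1 ++ [PySem.Str.join "" (c :: cs)], some [value])
            | _ => (st.1, some [value])
          else
            match st.2 with
            | some cp => (st.1, some (cp ++ [String.ofList (':' :: value.toList)]))
            | none => (st.1, none)) st)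
        (values.foldl (fun rgroups value =>
          if PySem.Str.startswith value "55:aa:eb:90" then
            [value] :: rgroups
          else
            match rgroups with
            | g :: gs => (g ++ [value]) :: gs
            | [] => []) rgroups) := by
  induction values with
  | nil => intro st rgroups h; exact h
  | cons v vs ih =>
      intro st rgroups h
      rw [List.foldl_cons, List.foldl_cons]
      apply ih
      by_cases hs : PySem.Str.startswith v "55:aa:eb:90" = true
      · rcases h with ⟨hr, hst⟩ | ⟨g, gs, hr, hg, h2, h1⟩
        · subst hr; subst hst
          simp only [hs, if_true]
          right
          exact ⟨[v], [], rfl, by simp, rfl, by simp⟩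
        · rcases g with _ | ⟨x, xs⟩
          · exact absurd rfl hg
          subst hr
          simp only [hs, if_true, h2, avColonize]
          right
          refine ⟨[v], (x :: xs) :: gs, rfl, by simp, rfl, ?_⟩
          simp [h1, avJoin_colonize x xs]
      · rcases h with ⟨hr, hst⟩ | ⟨g, gs, hr, hg, h2, h1⟩
        · subst hr; subst hst
          simp only [hs]
          left; exact ⟨rfl, rfl⟩
        · subst hr
          simp only [hs, h2]
          right
          refine ⟨g ++ [v], gs, rfl, by simp, ?_, h1⟩
          simp [avColonize_append g v hg]

-- ===== VERDICT (by name: the statement is the Claim_ definition above) =====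
theorem append_values_spec : Claim_equal_append_values := by
  intro values _ _
  show append_values values = append_values_alt values
  have h : avInv (avLoopA values) (avGroupsRev values) := by
    unfold avLoopA avGroupsRev
    exact avInv_fold values ([], none) [] (Or.inl ⟨rfl, rfl⟩)
  rcases h with ⟨hr, hst⟩ | ⟨g, gs, hr, hg, h2, h1⟩
  · simp [append_values, append_values_alt, hr, hst]
  · rcases g with _ | ⟨x, xs⟩
    · exact absurd rfl hg
    have hj := avJoin_colonize x xs
    simp only [append_values, append_values_alt, hr, h2, avColonize, List.reverse_cons,
      List.dropLast_concat, List.getLast?_concat, List.length_cons, List.length_map]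
    rw [h1]
    by_cases h4 : xs.length + 1 = 4
    · simp [h4, hj]
    · simp [h4]
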